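-- pv_equiv track=rewrite | github.com/LucasLLCA/api-processo-sei | scripts/pipeline/hierarchy.py | all_ancestor_unidades
-- ===== SOURCE A (Python) =====
-- def parent_unidade(sigla: str) -> str | None:
--     """Return the parent unidade sigla, or None for top-level units.
--
--     'SEAD-PI/GAB/NTGD' -> 'SEAD-PI/GAB'
--     'SEAD-PI'           -> None
--     """
--     parts = sigla.split("/")
--     if len(parts) <= 1:
--         return None
--     return "/".join(parts[:-1])
--
-- def all_ancestor_unidades(sigla: str) -> list[str]:
--     """Return all ancestor siglas, from immediate parent up to the root.
--
--     'A/B/C' -> ['A/B', 'A']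
--     'A'     -> []
--     """
--     ancestors: list[str] = []
--     current = sigla
--     while True:
--         parent = parent_unidade(current)
--         if parent is None:
--             break
--         ancestors.append(parent)
--         current = parent
--     return ancestors
-- ===== SOURCE B (Python) =====
-- def all_ancestor_unidades(sigla: str) -> list[str]:
--     """Return all ancestor siglas, from immediate parent up to the root."""
--     parts = sigla.split("/")
--     return ["/".join(parts[:i]) for i in range(len(parts) - 1, 0, -1)]
-- ===== Notes on version B (the rewrite author's own statement) =====
-- stated objective: simpler
-- what changed: Splits the string once into segments and emits each ancestor by joining a prefix slice of the segment list over a descending range, instead of repeatedly re-splitting and re-joining the shrinking string in a while loop via a helper.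
import Mathlib
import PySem

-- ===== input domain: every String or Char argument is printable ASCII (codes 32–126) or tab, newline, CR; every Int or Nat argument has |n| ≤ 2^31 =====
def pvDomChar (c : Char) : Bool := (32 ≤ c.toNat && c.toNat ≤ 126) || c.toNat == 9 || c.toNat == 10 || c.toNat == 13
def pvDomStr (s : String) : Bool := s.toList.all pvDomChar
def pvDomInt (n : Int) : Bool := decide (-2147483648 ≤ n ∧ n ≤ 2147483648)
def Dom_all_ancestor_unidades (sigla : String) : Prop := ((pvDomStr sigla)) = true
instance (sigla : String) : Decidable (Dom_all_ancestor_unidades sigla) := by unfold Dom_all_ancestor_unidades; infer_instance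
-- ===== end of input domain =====

-- B splits the string once and emits each ancestor as a prefix slice in a descending-range
-- comprehension, instead of A's while loop that re-splits and re-joins via a helper (objective: simpler).

-- ===== PORT A =====
def parent_unidade (sigla : String) : Option String :=
  let parts : List String := (PySem.Chars.splitOn sigla.toList ['/']).map String.ofList
  if parts.length ≤ 1 then none
  else some (PySem.Str.join "/" (PySem.List.slice parts none (some (-1))))

-- termination lemma for the while loop of A (cited by name in decreasing_by)
lemma pvGoSpec (fuel : Nat) : ∀ (l cur : List Char) (accs : List (List Char)), l.length ≤ fuel →
    PySem.Chars.splitOn.go ['/'] fuel l cur accs =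
      accs.reverse ++ (l.splitOn '/').modifyHead (cur.reverse ++ ·) := by
  induction fuel with
  | zero =>
    intro l cur accs h
    have : l = [] := List.eq_nil_of_length_eq_zero (Nat.le_zero.mp h)
    subst this
    simp [PySem.Chars.splitOn.go, List.splitOn_nil]
  | succ n ih =>
    intro l cur accs h
    cases l with
    | nil => simp [PySem.Chars.splitOn.go, List.splitOn_nil]
    | cons c rest =>
      rw [PySem.Chars.splitOn.go]
      by_cases hc : c = '/'
      · subst hc
        have hpre : List.isPrefixOf ['/'] ('/' :: rest) = true := by simp [List.isPrefixOf]
        rw [if_pos hpre]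
        simp only [List.length_cons, List.length_nil, List.drop_succ_cons, List.drop_zero]
        rw [ih rest [] (cur.reverse :: accs) (by simpa using Nat.le_of_succ_le_succ h)]
        have : ('/' :: rest).splitOn '/' = [] :: rest.splitOn '/' := by
          simp [List.splitOn, List.splitOnP_cons]
        rw [this]
        rcases hne : rest.splitOn '/' with _ | ⟨hd, tl⟩
        · exact absurd hne (List.splitOnP_ne_nil _ _)
        · simp
      · have hpre : List.isPrefixOf ['/'] (c :: rest) = false := by
          simp [List.isPrefixOf]; exact fun hcontra => hc hcontra.symm
        rw [if_neg (by simp [hpre])]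
        rw [ih rest (c :: cur) accs (by simpa using Nat.le_of_succ_le_succ h)]
        have : (c :: rest).splitOn '/' = (rest.splitOn '/').modifyHead (c :: ·) := by
          simp [List.splitOn, List.splitOnP_cons, hc]
        rw [this]
        rcases hne : rest.splitOn '/' with _ | ⟨hd, tl⟩
        · exact absurd hne (List.splitOnP_ne_nil _ _)
        · simp

lemma pvSplitEq (l : List Char) : PySem.Chars.splitOn l ['/'] = l.splitOn '/' := by
  rw [PySem.Chars.splitOn, pvGoSpec (l.length + 1) l [] [] (by omega)]
  rcases hne : l.splitOn '/' with _ | ⟨hd, tl⟩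
  · exact absurd hne (List.splitOnP_ne_nil _ _)
  · simp

lemma pvNotMemSplitOn (l : List Char) : ∀ p ∈ l.splitOn '/', '/' ∉ p := by
  induction l with
  | nil => simp [List.splitOn_nil]
  | cons c rest ih =>
    by_cases hc : c = '/'
    · subst hc
      have : ('/' :: rest).splitOn '/' = [] :: rest.splitOn '/' := by
        simp [List.splitOn, List.splitOnP_cons]
      rw [this]
      intro p hp
      rcases List.mem_cons.mp hp with hp | hp
      · simp [hp]
      · exact ih p hp
    · have : (c :: rest).splitOn '/' = (rest.splitOn '/').modifyHead (c :: ·) := by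
        simp [List.splitOn, List.splitOnP_cons, hc]
      rw [this]
      rcases hne : rest.splitOn '/' with _ | ⟨hd, tl⟩
      · exact absurd hne (List.splitOnP_ne_nil _ _)
      · intro p hp
        rcases List.mem_cons.mp hp with hp | hp
        · subst hp
          intro hmem
          rcases List.mem_cons.mp hmem with hmem | hmem
          · exact hc hmem.symm
          · exact ih hd (by rw [hne]; exact List.mem_cons_self) hmem
        · exact ih p (by rw [hne]; exact List.mem_cons_of_mem _ hp)

-- closed description of parent_unidade
lemma pvParentEq (s : String) :
    parent_unidade s =
      if (s.toList.splitOn '/').length ≤ 1 then none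
      else some (String.ofList (List.intercalate ['/'] (s.toList.splitOn '/').dropLast)) := by
  unfold parent_unidade
  rw [pvSplitEq]
  simp only [List.length_map]
  by_cases h : (s.toList.splitOn '/').length ≤ 1
  · rw [if_pos h, if_pos h]
  · rw [if_neg h, if_neg h]
    congr 1
    have h1 : (-1 : Int) = -((1 : Nat) : Int) := by norm_num
    rw [h1, PySem.List.slice_to_neg_natCast _ 1 (by omega)]
    rw [← List.dropLast_eq_take, ← List.map_dropLast]
    rw [PySem.Str.join]
    congr 1
    rw [List.map_map]
    have : (String.toList ∘ String.ofList) = id := by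
      funext l; simp [Function.comp, String.toList_ofList]
    rw [this, List.map_id, PySem.Chars.join]
    rfl

lemma pvParentLt (s p : String) (h : parent_unidade s = some p) :
    (PySem.Chars.splitOn p.toList ['/']).length < (PySem.Chars.splitOn s.toList ['/']).length := by
  rw [pvSplitEq, pvSplitEq]
  rw [pvParentEq] at h
  by_cases hlen : (s.toList.splitOn '/').length ≤ 1
  · rw [if_pos hlen] at h; exact absurd h (by simp)
  · rw [if_neg hlen] at h
    have hp : p = String.ofList (List.intercalate ['/'] (s.toList.splitOn '/').dropLast) :=
      (Option.some.injEq _ _ ▸ h).symm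
    subst hp
    rw [String.toList_ofList]
    have hnd : (s.toList.splitOn '/').dropLast ≠ [] := by
      intro hcon
      have := congrArg List.length hcon
      simp [List.length_dropLast] at this
      omega
    have hnomem : ∀ l ∈ (s.toList.splitOn '/').dropLast, '/' ∉ l := fun l hl =>
      pvNotMemSplitOn s.toList l (List.dropLast_subset _ hl)
    rw [show List.intercalate ['/'] (s.toList.splitOn '/').dropLast
          = ['/'].intercalate (s.toList.splitOn '/').dropLast from rfl]
    rw [List.splitOn_intercalate _ '/' hnomem hnd]
    rw [List.length_dropLast]
    omega

def pvAllAncLoop (current : String) (ancestors : List String) : List String :=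
  match h : parent_unidade current with
  | none => ancestors
  | some p => pvAllAncLoop p (ancestors ++ [p])
termination_by (PySem.Chars.splitOn current.toList ['/']).length
decreasing_by exact pvParentLt _ _ h

def all_ancestor_unidades (sigla : String) : List String :=
  pvAllAncLoop sigla []

-- ===== PORT B =====
def all_ancestor_unidades_alt (sigla : String) : List String :=
  let parts : List String := (PySem.Chars.splitOn sigla.toList ['/']).map String.ofList
  (PySem.List.pyRange ((parts.length : Int) - 1) 0 (-1)).map
    (fun i => PySem.Str.join "/" (PySem.List.slice parts none (some i)))

-- ===== PRECONDITION & SPEC =====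
def Spec_all_ancestor_unidades (sigla : String) (out : List String) : Prop := out = all_ancestor_unidades_alt sigla
instance (sigla : String) (out : List String) : Decidable (Spec_all_ancestor_unidades sigla out) := by unfold Spec_all_ancestor_unidades; infer_instance

-- ===== CLAIM (what is proved, stated in full; the proofs are below) =====
def Claim_equal_all_ancestor_unidades : Prop := ∀ (sigla : String), Dom_all_ancestor_unidades sigla → Spec_all_ancestor_unidades sigla (all_ancestor_unidades sigla)

-- ===== LEMMAS AND PROOFS =====

-- the closed form both sides reach: ancestors are the proper prefixes of decreasing length
def pvClosed (parts : List (List Char)) : List String :=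
  (List.range (parts.length - 1)).map
    (fun k => String.ofList (List.intercalate ['/'] (parts.take (parts.length - 1 - k))))

lemma pvClosedCons (parts : List (List Char)) (h : 2 ≤ parts.length) :
    pvClosed parts = String.ofList (List.intercalate ['/'] parts.dropLast) :: pvClosed parts.dropLast := by
  unfold pvClosed
  obtain ⟨m, hm⟩ : ∃ m, parts.length = m + 2 := ⟨parts.length - 2, by omega⟩
  rw [List.length_dropLast, hm]
  have h1 : m + 2 - 1 = m + 1 := by omega
  have h2 : m + 1 - 1 = m := by omega
  rw [h1, h2, List.range_succ_eq_map, List.map_cons, List.map_map]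
  congr 1
  · rw [List.dropLast_eq_take, hm, h1, Nat.sub_zero]
  · apply List.map_congr_left
    intro k hk
    rw [List.mem_range] at hk
    simp only [Function.comp]
    have e1 : List.take (m - k) parts.dropLast = List.take (m - k) parts := by
      rw [List.dropLast_eq_take, List.take_take, hm, h1]
      congr 1
      omega
    have e2 : m + 1 - Nat.succ k = m - k := by omega
    rw [e1, e2]

lemma pvLoopSpec (n : Nat) : ∀ (parts : List (List Char)) (current : String) (acc : List String),
    parts.length = n → parts ≠ [] → (∀ l ∈ parts, '/' ∉ l) →
    current.toList = List.intercalate ['/'] parts →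
    pvAllAncLoop current acc = acc ++ pvClosed parts := by
  induction n using Nat.strong_induction_on with
  | _ n ih =>
    intro parts current acc hn hne hnomem hcur
    rw [pvAllAncLoop.eq_def]
    have hsplit : current.toList.splitOn '/' = parts := by
      rw [hcur, show List.intercalate ['/'] parts = ['/'].intercalate parts from rfl]
      exact List.splitOn_intercalate _ '/' hnomem hne
    by_cases hlen : parts.length ≤ 1
    · have hpar : parent_unidade current = none := by
        rw [pvParentEq, hsplit, if_pos hlen]
      split
      next heq =>
        have : parts.length - 1 = 0 := by omega
        simp [pvClosed, this]
      next p heq =>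
        rw [hpar] at heq; exact absurd heq (by simp)
    · have hpar : parent_unidade current
          = some (String.ofList (List.intercalate ['/'] parts.dropLast)) := by
        rw [pvParentEq, hsplit, if_neg hlen]
      have hlt : parts.dropLast.length < n := by
        rw [List.length_dropLast]; omega
      have hne' : parts.dropLast ≠ [] := by
        intro hcon
        have := congrArg List.length hcon
        simp [List.length_dropLast] at this
        omega
      split
      next heq =>
        rw [hpar] at heq; exact absurd heq (by simp)
      next p heq =>
      rw [hpar] at heq
      have hp : p = String.ofList (List.intercalate ['/'] parts.dropLast) :=
        (Option.some.injEq _ _ ▸ heq).symm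
      subst hp
      rw [ih parts.dropLast.length hlt parts.dropLast _ _ rfl hne'
            (fun l hl => hnomem l (List.dropLast_subset _ hl)) String.toList_ofList]
      rw [List.append_assoc, pvClosedCons parts (by omega), List.singleton_append]

lemma pvAltSpec (sigla : String) :
    all_ancestor_unidades_alt sigla = pvClosed (sigla.toList.splitOn '/') := by
  unfold all_ancestor_unidades_alt pvClosed
  rw [pvSplitEq]
  set parts := sigla.toList.splitOn '/' with hparts
  simp only [List.length_map]
  rw [PySem.List.pyRange_neg_one, List.map_map]
  have hnn : (((parts.length : Int) - 1) - 0).toNat = parts.length - 1 := by omega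
  rw [hnn]
  apply List.map_congr_left
  intro k hk
  rw [List.mem_range] at hk
  have hpos : parts.length ≠ 0 := by
    intro hcon
    exact List.splitOnP_ne_nil _ _ (List.length_eq_zero_iff.mp (hparts ▸ hcon))
  simp only [Function.comp]
  have hcast : ((parts.length : Int) - 1 - (k : Int)) = ((parts.length - 1 - k : Nat) : Int) := by
    have : (parts.length - 1 - k : Nat) + 1 + k = parts.length := by omega
    omega
  rw [hcast, PySem.List.slice_to_natCast, ← List.map_take, PySem.Str.join]
  congr 1
  rw [List.map_map]
  have : (String.toList ∘ String.ofList) = id := by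
    funext l; simp [Function.comp, String.toList_ofList]
  rw [this, List.map_id, PySem.Chars.join]
  rfl

-- ===== VERDICT (by name: the statement is the Claim_ definition above) =====
theorem all_ancestor_unidades_spec : Claim_equal_all_ancestor_unidades := by
  intro sigla _
  unfold Spec_all_ancestor_unidades all_ancestor_unidades
  rw [pvAltSpec]
  have hne : sigla.toList.splitOn '/' ≠ [] := List.splitOnP_ne_nil _ _
  have hcur : sigla.toList = List.intercalate ['/'] (sigla.toList.splitOn '/') := by
    rw [show List.intercalate ['/'] (sigla.toList.splitOn '/')
          = ['/'].intercalate (sigla.toList.splitOn '/') from rfl]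
    exact (List.intercalate_splitOn sigla.toList '/').symm
  rw [pvLoopSpec (sigla.toList.splitOn '/').length (sigla.toList.splitOn '/') sigla []
        rfl hne (pvNotMemSplitOn sigla.toList) hcur, List.nil_append]
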